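-- pv_equiv track=rewrite | github.com/bryceroche/mycelium | mycelium/calibration.py | extract_digit_runs_after_eq
-- ===== SOURCE A (Python) =====
-- from typing import List, Tuple
--
-- def extract_digit_runs_after_eq(tokens_1d, eq_positions: List[int], digit_token_ids: set,
--                                  max_digits: int = 4) -> List[Tuple[int, List[int], List[int]]]:
--     """For each eq_pos, find the contiguous run of digit tokens that follows.
--
--     Returns: list of (eq_pos, digit_positions, digit_ids) per step.
--     digit_positions: token indices of the digit run (length up to max_digits)
--     digit_ids: the actual token ids at those positions (the ground-truth answer)
--
--     The run ends at the first non-digit token (e.g., space, "+", "-", " items", etc).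
--     For digit-spaced encoding, digits are individual tokens like " 3", " 1", etc.
--     """
--     out = []
--     n = len(tokens_1d)
--     for eq in eq_positions:
--         digit_positions: List[int] = []
--         digit_ids: List[int] = []
--         # Start scanning from the token AFTER "=". The "=" rep predicts the first
--         # digit at position eq+1.
--         i = eq + 1
--         while i < n and len(digit_positions) < max_digits and tokens_1d[i] in digit_token_ids:
--             digit_positions.append(i)
--             digit_ids.append(int(tokens_1d[i]))
--             i += 1
--         if digit_positions:  # only include steps with at least 1 digit
--             out.append((eq, digit_positions, digit_ids))
--     return out
-- ===== SOURCE B (Python) =====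
-- def extract_digit_runs_after_eq(tokens_1d, eq_positions, digit_token_ids,
--                                 max_digits=4):
--     """Suffix run-length table: one backward pass over tokens, then O(1) lookup
--     per eq position instead of a per-eq while-scan."""
--     n = len(tokens_1d)
--     runlen = [0] * (n + 1)
--     for i in range(n - 1, -1, -1):
--         runlen[i] = runlen[i + 1] + 1 if tokens_1d[i] in digit_token_ids else 0
--     out = []
--     for eq in eq_positions:
--         start = eq + 1
--         k = min(runlen[start], max_digits) if 0 <= start < n else 0
--         if k > 0:
--             out.append((eq,
--                         list(range(start, start + k)),
--                         [int(tokens_1d[j]) for j in range(start, start + k)]))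
--     return out
-- ===== Notes on version B (the rewrite author's own statement) =====
-- stated objective: alternative
-- what changed: Replaces A's per-eq-position while-scan over tokens by a suffix run-length table built in one backward pass, so each eq position becomes a constant-time table lookup plus a range slice.
-- intended difference: On eq positions with -len(tokens_1d) <= eq+1 < 0 whose wrapped-around token tokens_1d[eq+1] is a digit token (and max_digits >= 1), A's negative-index wraparound emits a run starting at the negative index eq+1; B emits no run for that eq, which is intended since no token follows such an eq position. — e.g. on extract_digit_runs_after_eq([7], [-2], [7], 4): A returns [(-2, [-1, 0], [7, 7])], B returns []
import Mathlib
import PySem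

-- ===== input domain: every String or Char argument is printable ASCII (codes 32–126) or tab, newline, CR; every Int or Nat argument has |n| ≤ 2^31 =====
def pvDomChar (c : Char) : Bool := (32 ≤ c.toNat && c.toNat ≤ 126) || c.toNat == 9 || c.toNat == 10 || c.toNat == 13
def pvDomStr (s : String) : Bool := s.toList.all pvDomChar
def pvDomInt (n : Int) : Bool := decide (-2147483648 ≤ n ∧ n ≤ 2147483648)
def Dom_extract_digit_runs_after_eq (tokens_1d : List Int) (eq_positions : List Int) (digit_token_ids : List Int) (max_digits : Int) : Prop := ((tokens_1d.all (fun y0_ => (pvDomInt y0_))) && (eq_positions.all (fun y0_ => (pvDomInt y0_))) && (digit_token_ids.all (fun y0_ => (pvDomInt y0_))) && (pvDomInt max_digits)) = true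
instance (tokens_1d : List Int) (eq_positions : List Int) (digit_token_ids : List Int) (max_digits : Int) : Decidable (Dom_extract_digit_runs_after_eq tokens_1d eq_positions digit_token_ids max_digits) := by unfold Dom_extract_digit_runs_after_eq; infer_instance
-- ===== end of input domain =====

-- B replaces A's per-eq while-scan by a suffix run-length table built in one backward
-- pass, looked up per eq position (objective: alternative decomposition).

-- ===== PORT A =====
-- A's inner while-loop: scan from i while in range, under the cap, and a digit token.
def pvALoop (toks dig : List Int) (maxd : Int) (i : Int) (pos ids : List Int) :
    List Int × List Int :=
  if h : i < (toks.length : Int) ∧ (pos.length : Int) < maxd then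
    match PySem.List.pyGet? toks i with
    | none => (pos, ids)   -- Python raises IndexError here; Pre_ excludes these inputs
    | some t =>
      if t ∈ dig then pvALoop toks dig maxd (i + 1) (pos ++ [i]) (ids ++ [t])
      else (pos, ids)
  else (pos, ids)
termination_by ((toks.length : Int) - i).toNat
decreasing_by omega

def extract_digit_runs_after_eq (tokens_1d : List Int) (eq_positions : List Int) (digit_token_ids : List Int) (max_digits : Int) : List (Int × List Int × List Int) :=
  eq_positions.foldl (fun out eq =>
    let r := pvALoop tokens_1d digit_token_ids max_digits (eq + 1) [] []
    if r.1 ≠ [] then out ++ [(eq, r.1, r.2)] else out) []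

-- ===== PORT B =====
-- B's backward pass: runlen[i] = runlen[i+1]+1 if tokens[i] is a digit token else 0.
def pvRunlens (toks dig : List Int) : List Nat :=
  match toks with
  | [] => []
  | t :: rest =>
    let r := pvRunlens rest dig
    (if t ∈ dig then r.headD 0 + 1 else 0) :: r

def extract_digit_runs_after_eq_alt (tokens_1d : List Int) (eq_positions : List Int) (digit_token_ids : List Int) (max_digits : Int) : List (Int × List Int × List Int) :=
  let n : Int := tokens_1d.length
  let rl := pvRunlens tokens_1d digit_token_ids
  eq_positions.foldl (fun out eq =>
    let start := eq + 1
    let k : Int := if 0 ≤ start ∧ start < n then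
        min ((rl.getD start.toNat 0 : Int)) max_digits else 0
    if 0 < k then
      out ++ [(eq, PySem.List.pyRange start (start + k) 1,
               (PySem.List.pyRange start (start + k) 1).map
                 (fun j => (PySem.List.pyGet? tokens_1d j).getD 0))]
    else out) []

-- ===== PRECONDITION & SPEC =====
-- Pre_ excludes exactly the inputs where A raises IndexError: some eq position with
-- eq+1 below -len(tokens_1d) while max_digits ≥ 1 (the scan's first access is out of range).
def Pre_extract_digit_runs_after_eq (tokens_1d : List Int) (eq_positions : List Int) (digit_token_ids : List Int) (max_digits : Int) : Prop :=
  max_digits ≤ 0 ∨ ∀ eq ∈ eq_positions, -(tokens_1d.length : Int) ≤ eq + 1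
instance (tokens_1d : List Int) (eq_positions : List Int) (digit_token_ids : List Int) (max_digits : Int) : Decidable (Pre_extract_digit_runs_after_eq tokens_1d eq_positions digit_token_ids max_digits) := by unfold Pre_extract_digit_runs_after_eq; infer_instance

def pvWitness_extract_digit_runs_after_eq : List Int × List Int × List Int × Int :=
  ([5, 7], [0], [7], 4)

-- On eq positions with -len ≤ eq+1 < 0 whose wrapped-around token is a digit token
-- (max_digits ≥ 1), A's negative-index wraparound emits a run starting at the negative
-- index eq+1; B emits no run there, which is the intended behaviour (there is no token
-- after such an eq position).
def D_extract_digit_runs_after_eq (tokens_1d : List Int) (eq_positions : List Int) (digit_token_ids : List Int) (max_digits : Int) : Prop :=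
  1 ≤ max_digits ∧ ∃ eq ∈ eq_positions, eq + 1 < 0 ∧ 0 ≤ eq + 1 + (tokens_1d.length : Int) ∧
    tokens_1d.getD (eq + 1 + (tokens_1d.length : Int)).toNat 0 ∈ digit_token_ids
instance (tokens_1d : List Int) (eq_positions : List Int) (digit_token_ids : List Int) (max_digits : Int) : Decidable (D_extract_digit_runs_after_eq tokens_1d eq_positions digit_token_ids max_digits) := by unfold D_extract_digit_runs_after_eq; infer_instance

def Spec_extract_digit_runs_after_eq (tokens_1d : List Int) (eq_positions : List Int) (digit_token_ids : List Int) (max_digits : Int) (out : List (Int × List Int × List Int)) : Prop := ¬ D_extract_digit_runs_after_eq tokens_1d eq_positions digit_token_ids max_digits → out = extract_digit_runs_after_eq_alt tokens_1d eq_positions digit_token_ids max_digits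
instance (tokens_1d : List Int) (eq_positions : List Int) (digit_token_ids : List Int) (max_digits : Int) (out : List (Int × List Int × List Int)) : Decidable (Spec_extract_digit_runs_after_eq tokens_1d eq_positions digit_token_ids max_digits out) := by unfold Spec_extract_digit_runs_after_eq; infer_instance

def pvDiffWitness_extract_digit_runs_after_eq : List Int × List Int × List Int × Int :=
  ([7], [-2], [7], 4)
def pvDiffWitnessOut_extract_digit_runs_after_eq : (List (Int × List Int × List Int)) × (List (Int × List Int × List Int)) :=
  ([(-2, [-1, 0], [7, 7])], [])

-- ===== CLAIM (what is proved, stated in full; the proofs are below) =====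
def Claim_unchanged_extract_digit_runs_after_eq : Prop := ∀ (tokens_1d : List Int) (eq_positions : List Int) (digit_token_ids : List Int) (max_digits : Int), Dom_extract_digit_runs_after_eq tokens_1d eq_positions digit_token_ids max_digits → Pre_extract_digit_runs_after_eq tokens_1d eq_positions digit_token_ids max_digits → Spec_extract_digit_runs_after_eq tokens_1d eq_positions digit_token_ids max_digits (extract_digit_runs_after_eq tokens_1d eq_positions digit_token_ids max_digits)
def Claim_changed_extract_digit_runs_after_eq : Prop := Dom_extract_digit_runs_after_eq (pvDiffWitness_extract_digit_runs_after_eq.1) (pvDiffWitness_extract_digit_runs_after_eq.2.1) (pvDiffWitness_extract_digit_runs_after_eq.2.2.1) (pvDiffWitness_extract_digit_runs_after_eq.2.2.2) ∧ Pre_extract_digit_runs_after_eq (pvDiffWitness_extract_digit_runs_after_eq.1) (pvDiffWitness_extract_digit_runs_after_eq.2.1) (pvDiffWitness_extract_digit_runs_after_eq.2.2.1) (pvDiffWitness_extract_digit_runs_after_eq.2.2.2) ∧ D_extract_digit_runs_after_eq (pvDiffWitness_extract_digit_runs_after_eq.1) (pvDiffWitness_extract_digit_runs_after_eq.2.1)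 (pvDiffWitness_extract_digit_runs_after_eq.2.2.1) (pvDiffWitness_extract_digit_runs_after_eq.2.2.2) ∧ extract_digit_runs_after_eq (pvDiffWitness_extract_digit_runs_after_eq.1) (pvDiffWitness_extract_digit_runs_after_eq.2.1) (pvDiffWitness_extract_digit_runs_after_eq.2.2.1) (pvDiffWitness_extract_digit_runs_after_eq.2.2.2) = pvDiffWitnessOut_extract_digit_runs_after_eq.1 ∧ extract_digit_runs_after_eq_alt (pvDiffWitness_extract_digit_runs_after_eq.1) (pvDiffWitness_extract_digit_runs_after_eq.2.1) (pvDiffWitness_extract_digit_runs_after_eq.2.2.1) (pvDiffWitness_extract_digit_runs_after_eq.2.2.2) = pvDiffWitnessOut_extract_digit_runs_after_eq.2 ∧ pvDiffWitnessOut_extract_digit_runs_after_eq.1 ≠ pvDiffWitnessOut_extract_digit_runs_after_eq.2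
-- ===== LEMMAS AND PROOFS =====

-- number of consecutive digit tokens starting at index i
def pvRlen (toks dig : List Int) (i : Nat) : Nat :=
  ((toks.drop i).takeWhile (fun t => decide (t ∈ dig))).length

theorem pvRunlens_getD (toks dig : List Int) (i : Nat) :
    (pvRunlens toks dig).getD i 0 = pvRlen toks dig i := by
  induction toks generalizing i with
  | nil => simp [pvRunlens, pvRlen]
  | cons t rest ih =>
    cases i with
    | zero =>
      have h0 := ih 0
      simp only [pvRunlens, pvRlen, List.drop_zero, List.takeWhile_cons] at *
      by_cases ht : t ∈ dig <;>
        simp only [ht, decide_true, decide_false, if_true, if_false, List.length_cons,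
          List.length_nil, List.getD, List.getElem?_cons_zero, Option.getD_some, ← h0,
          List.headD_eq_head?_getD] <;>
        cases pvRunlens rest dig <;> simp
    | succ m =>
      simpa [pvRunlens, pvRlen] using ih m

theorem pvRlen_le (toks dig : List Int) (i : Nat) :
    pvRlen toks dig i ≤ toks.length - i := by
  unfold pvRlen
  have h : ((toks.drop i).takeWhile (fun t => decide (t ∈ dig))).length ≤ (toks.drop i).length := by
    induction toks.drop i with
    | nil => simp
    | cons a l ihl =>
      rw [List.takeWhile_cons]
      by_cases h : a ∈ dig <;> simp [h] <;> omega
  simpa using h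

theorem pvALoop_spec (toks dig : List Int) (maxd : Int) :
    ∀ (fuel i : Nat), toks.length ≤ i + fuel → ∀ (pos ids : List Int),
    pvALoop toks dig maxd (i : Int) pos ids =
      (pos ++ PySem.List.pyRange (i : Int)
          ((i : Int) + (min (pvRlen toks dig i) (maxd - pos.length).toNat : Nat)) 1,
       ids ++ (PySem.List.pyRange (i : Int)
          ((i : Int) + (min (pvRlen toks dig i) (maxd - pos.length).toNat : Nat)) 1).map
          (fun j => toks.getD j.toNat 0)) := by
  intro fuel
  induction fuel with
  | zero =>
    intro i hle pos ids
    have hdrop : toks.drop i = [] := List.drop_eq_nil_of_le (by omega)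
    rw [pvALoop, dif_neg (by push_cast; omega)]
    rw [PySem.List.pyRange_one_eq_nil (by simp [pvRlen, hdrop])]
    simp
  | succ fuel ih =>
    intro i hle pos ids
    by_cases hi : i < toks.length
    · by_cases hm : (pos.length : Int) < maxd
      · rw [pvALoop, dif_pos ⟨by exact_mod_cast hi, hm⟩]
        rw [PySem.List.pyGet?_natCast, List.getElem?_eq_getElem hi]
        dsimp only
        have hdrop : toks.drop i = toks[i] :: toks.drop (i + 1) :=
          List.drop_eq_getElem_cons hi
        by_cases hd : toks[i] ∈ dig
        · rw [if_pos hd]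
          have hcast : (i : Int) + 1 = ((i + 1 : Nat) : Int) := by push_cast; ring
          rw [hcast, ih (i + 1) (by omega)]
          have hrl : pvRlen toks dig i = pvRlen toks dig (i + 1) + 1 := by
            unfold pvRlen
            rw [hdrop, List.takeWhile_cons]
            simp [hd]
          set k' : Nat := min (pvRlen toks dig (i + 1))
              (maxd - ((pos ++ [(i : Int)]).length : Int)).toNat with hk'
          have hk : min (pvRlen toks dig i) (maxd - (pos.length : Int)).toNat = k' + 1 := by
            rw [hk', hrl]; simp only [List.length_append, List.length_cons, List.length_nil]
            push_cast; omega
          rw [hk]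
          have hcons : PySem.List.pyRange (i : Int) ((i : Int) + ((k' + 1 : Nat) : Int)) 1
              = (i : Int) :: PySem.List.pyRange ((i + 1 : Nat) : Int)
                  (((i + 1 : Nat) : Int) + (k' : Int)) 1 := by
            rw [PySem.List.pyRange_one_cons (by push_cast; omega)]
            congr 1
            push_cast
            ring
          rw [hcons]
          rw [Prod.mk.injEq]
          refine ⟨by simp, ?_⟩
          rw [List.map_cons]
          simp [List.getD_eq_getElem?_getD, List.getElem?_eq_getElem hi]
        · rw [if_neg hd]
          have hrl : pvRlen toks dig i = 0 := by
            unfold pvRlen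
            rw [hdrop, List.takeWhile_cons]
            simp [hd]
          rw [PySem.List.pyRange_one_eq_nil (by simp [hrl])]
          simp
      · rw [pvALoop, dif_neg (by push_cast at hm ⊢; omega)]
        rw [PySem.List.pyRange_one_eq_nil (by have : (maxd - (pos.length:Int)).toNat = 0 := by omega
                                              simp [this])]
        simp
    · rw [pvALoop, dif_neg (by push_cast; omega)]
      have hdrop : toks.drop i = [] := List.drop_eq_nil_of_le (by omega)
      rw [PySem.List.pyRange_one_eq_nil (by simp [pvRlen, hdrop])]
      simp

-- per-eq agreement of the two fold steps, under A-returns and no-wrap hypotheses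
theorem pvStep_eq (toks dig : List Int) (maxd eq : Int)
    (hpre : maxd ≤ 0 ∨ -(toks.length : Int) ≤ eq + 1)
    (hnd : 1 ≤ maxd → ¬(eq + 1 < 0 ∧ 0 ≤ eq + 1 + (toks.length : Int) ∧
        toks.getD (eq + 1 + (toks.length : Int)).toNat 0 ∈ dig))
    (acc : List (Int × List Int × List Int)) :
    (let r := pvALoop toks dig maxd (eq + 1) [] []
     if r.1 ≠ [] then acc ++ [(eq, r.1, r.2)] else acc) =
    (let start := eq + 1
     let k : Int := if 0 ≤ start ∧ start < (toks.length : Int) then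
        min (((pvRunlens toks dig).getD start.toNat 0 : Int)) maxd else 0
     if 0 < k then
      acc ++ [(eq, PySem.List.pyRange start (start + k) 1,
               (PySem.List.pyRange start (start + k) 1).map
                 (fun j => (PySem.List.pyGet? toks j).getD 0))]
     else acc) := by
  by_cases hmd : maxd ≤ 0
  · rw [pvALoop, dif_neg (by simp; omega)]
    simp only [ne_eq, not_true_eq_false, if_false]
    have hk : ¬ (0 : Int) < (if 0 ≤ eq + 1 ∧ eq + 1 < (toks.length : Int) then
        min (((pvRunlens toks dig).getD (eq + 1).toNat 0 : Int)) maxd else 0) := by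
      split_ifs with h
      · have := min_le_right (((pvRunlens toks dig).getD (eq + 1).toNat 0 : Int)) maxd
        omega
      · omega
    simp only [hk, if_false]
  · have hmd1 : 1 ≤ maxd := by omega
    by_cases h0 : 0 ≤ eq + 1
    · -- nonnegative start: both sides are governed by min(rlen, maxd)
      have hi : eq + 1 = ((eq + 1).toNat : Int) := by omega
      set i : Nat := (eq + 1).toNat with hidef
      have hloop := pvALoop_spec toks dig maxd toks.length i (by omega) [] []
      simp only [List.length_nil, Int.natCast_zero, sub_zero, List.nil_append] at hloop
      rw [hi]
      dsimp only
      rw [hloop]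
      set kA : Nat := min (pvRlen toks dig i) maxd.toNat with hkA
      have hkB : (if 0 ≤ (i : Int) ∧ (i : Int) < (toks.length : Int) then
          min (((pvRunlens toks dig).getD ((i : Int)).toNat 0 : Int)) maxd else 0)
          = (kA : Int) := by
        simp only [Int.toNat_natCast]
        rw [pvRunlens_getD]
        split_ifs with h
        · rw [hkA, Nat.cast_min, Int.toNat_of_nonneg (by omega)]
        · have hge : toks.length ≤ i := by omega
          have hz : pvRlen toks dig i = 0 := by
            unfold pvRlen
            rw [List.drop_eq_nil_of_le hge]
            simp
          rw [hkA, hz]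
          simp
      rw [hkB]
      have hlen : (PySem.List.pyRange ((i : Int)) ((i : Int) + (kA : Int)) 1).length = kA := by
        rw [PySem.List.length_pyRange_one]; omega
      by_cases hk0 : kA = 0
      · rw [PySem.List.pyRange_one_eq_nil (by omega)]
        simp [hk0]
      · have hne : PySem.List.pyRange ((i : Int)) ((i : Int) + (kA : Int)) 1 ≠ [] := by
          intro hnil
          rw [hnil] at hlen
          simp at hlen
          omega
        rw [if_pos (by simpa using hne), if_pos (by omega)]
        have hmap : List.map (fun j => toks.getD j.toNat 0)
              (PySem.List.pyRange ((i : Int)) ((i : Int) + (kA : Int)) 1)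
            = List.map (fun j => (PySem.List.pyGet? toks j).getD 0)
              (PySem.List.pyRange ((i : Int)) ((i : Int) + (kA : Int)) 1) := by
          apply List.map_congr_left
          intro x hx
          rw [PySem.List.mem_pyRange_one] at hx
          have hxlt : x < (toks.length : Int) := by
            have h1 : kA ≤ pvRlen toks dig i := by rw [hkA]; omega
            have h2 := pvRlen_le toks dig i
            omega
          have hx2 : x.toNat < toks.length := by omega
          simp [PySem.List.pyGet?_of_nonneg toks (show (0 : Int) ≤ x by omega),
            List.getD_eq_getElem?_getD, List.getElem?_eq_getElem hx2]
        rw [hmap]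
    · -- negative start: A reads the wrapped token, which is not a digit token; B skips
      have hn : -(toks.length : Int) ≤ eq + 1 := by rcases hpre with h | h; omega; exact h
      have hwrap : PySem.List.pyGet? toks (eq + 1)
          = some (toks.getD (eq + 1 + (toks.length : Int)).toNat 0) := by
        simp only [PySem.List.pyGet?, PySem.List.pyIdx?]
        rw [if_neg (by omega), if_pos (by omega)]
        dsimp only [Option.bind]
        rw [List.getElem?_eq_getElem (by omega : toks.length - (-(eq + 1)).toNat < toks.length)]
        congr 1
        rw [List.getD_eq_getElem?_getD,
            List.getElem?_eq_getElem (by omega : (eq + 1 + (toks.length : Int)).toNat < toks.length)]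
        congr 1
        omega
      have hnd' := hnd hmd1
      have hdig : toks.getD (eq + 1 + (toks.length : Int)).toNat 0 ∉ dig := by
        intro hmem
        exact hnd' ⟨by omega, by omega, hmem⟩
      rw [pvALoop, dif_pos ⟨by omega, by simp; omega⟩, hwrap]
      dsimp only
      rw [if_neg hdig]
      simp only [ne_eq, not_true_eq_false, if_false]
      rw [if_neg (by rw [if_neg (by omega)]; omega)]

theorem extract_digit_runs_after_eq_spec : Claim_unchanged_extract_digit_runs_after_eq := by
  intro toks eqs dig maxd _ hpre hnd
  unfold extract_digit_runs_after_eq extract_digit_runs_after_eq_alt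
  apply PySem.List.foldl_congr_mem'
  intro eq heq acc
  apply pvStep_eq
  · rcases hpre with h | h
    · exact Or.inl h
    · exact Or.inr (h eq heq)
  · intro hmd1 hbad
    exact hnd ⟨hmd1, eq, heq, hbad.1, hbad.2.1, hbad.2.2⟩

set_option maxRecDepth 4096 in
theorem extract_digit_runs_after_eq_changed : Claim_changed_extract_digit_runs_after_eq := by
  unfold Claim_changed_extract_digit_runs_after_eq
  refine ⟨by decide, by decide, by decide, ?_, by decide, by decide⟩
  show extract_digit_runs_after_eq [7] [-2] [7] 4 = [(-2, [-1, 0], [7, 7])]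
  unfold extract_digit_runs_after_eq
  simp only [List.foldl_cons, List.foldl_nil]
  have hA : pvALoop [7] [7] 4 (-2 + 1) [] [] = ([-1, 0], [7, 7]) := by
    norm_num
    rw [pvALoop, dif_pos (by norm_num)]
    rw [show PySem.List.pyGet? [(7:Int)] (-1) = some 7 from rfl]
    dsimp only
    rw [if_pos (by norm_num)]
    rw [pvALoop, dif_pos (by norm_num)]
    rw [show PySem.List.pyGet? [(7:Int)] (-1 + 1) = some 7 from rfl]
    dsimp only
    rw [if_pos (by norm_num)]
    rw [pvALoop, dif_neg (by norm_num)]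
    decide
  rw [hA]
  decide
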